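-- pv_equiv track=rewrite | github.com/FoxDataSystems/test | standalone.py | group_urls_by_category
-- ===== SOURCE A (Python) =====
-- def categorize_url(url):
--     if "ninjakitchen.fr" in url:
--         return "FR", "Ninja"
--     elif "sharkclean.fr" in url:
--         return "FR", "Shark"
--     elif "ninjakitchen.es" in url:
--         return "ES", "Ninja"
--     elif "sharkclean.es" in url:
--         return "ES", "Shark"
--     elif "ninjakitchen.nl" in url or "ninjakitchen.be" in url:
--         return "NL" if "ninjakitchen.nl" in url else "BE", "Ninja"
--     elif "sharkclean.nl" in url or "sharkclean.be" in url:
--         return "NL" if "sharkclean.nl" in url else "BE", "Shark"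
--     else:
--         return None, None
--
-- def group_urls_by_category(urls):
--     grouped_urls = {}
--     for url in urls:
--         country, brand = categorize_url(url)
--         if country and brand:
--             key = f"{country}{brand}"
--             if key not in grouped_urls:
--                 grouped_urls[key] = []
--             grouped_urls[key].append(url)
--     return grouped_urls
-- ===== SOURCE B (Python) =====
-- _CATEGORIES = [
--     ("ninjakitchen.fr", "FR", "Ninja"),
--     ("sharkclean.fr", "FR", "Shark"),
--     ("ninjakitchen.es", "ES", "Ninja"),
--     ("sharkclean.es", "ES", "Shark"),
--     ("ninjakitchen.nl", "NL", "Ninja"),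
--     ("ninjakitchen.be", "BE", "Ninja"),
--     ("sharkclean.nl", "NL", "Shark"),
--     ("sharkclean.be", "BE", "Shark"),
-- ]
--
-- def _key(url):
--     return next((c + b for s, c, b in _CATEGORIES if s in url), None)
--
-- def group_urls_by_category(urls):
--     # staged passes: tag, order the distinct keys, then gather per key
--     keyed = [(k, u) for u in urls if (k := _key(u)) is not None]
--     keys = list(dict.fromkeys(k for k, _ in keyed))
--     return {k: [u for k2, u in keyed if k2 == k] for k in keys}
-- ===== Notes on version B (the rewrite author's own statement) =====
-- stated objective: alternative
-- what changed: Replaces the single mutating dict-of-lists loop by staged passes: tag each url with its key from an ordered (substring,country,brand) table, dedup the keys in first-occurrence order, then build each group by a per-key scan of the tagged list; no dict is mutated.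
import Mathlib
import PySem

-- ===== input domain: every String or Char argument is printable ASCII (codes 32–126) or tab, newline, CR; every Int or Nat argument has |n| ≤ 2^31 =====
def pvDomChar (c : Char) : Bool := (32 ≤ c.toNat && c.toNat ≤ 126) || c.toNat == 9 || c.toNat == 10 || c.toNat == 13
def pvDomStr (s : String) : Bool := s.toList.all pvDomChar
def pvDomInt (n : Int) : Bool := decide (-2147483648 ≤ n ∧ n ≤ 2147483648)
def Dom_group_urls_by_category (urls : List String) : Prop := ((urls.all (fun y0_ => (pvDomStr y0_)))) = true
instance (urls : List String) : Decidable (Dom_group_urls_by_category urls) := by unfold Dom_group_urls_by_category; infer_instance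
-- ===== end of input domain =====

-- B replaces A's single mutating dict-of-lists loop by staged passes: tag each url with its key
-- from an ordered (substring, country, brand) table, dedup the keys in first-occurrence order,
-- then build each group by a per-key scan of the tagged list (alternative decomposition, no dict).


-- ===== PORT A =====
def categorize_url (url : String) : Option String × Option String :=
  if PySem.Str.isIn "ninjakitchen.fr" url then (some "FR", some "Ninja")
  else if PySem.Str.isIn "sharkclean.fr" url then (some "FR", some "Shark")
  else if PySem.Str.isIn "ninjakitchen.es" url then (some "ES", some "Ninja")
  else if PySem.Str.isIn "sharkclean.es" url then (some "ES", some "Shark")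
  else if PySem.Str.isIn "ninjakitchen.nl" url || PySem.Str.isIn "ninjakitchen.be" url then
    ((if PySem.Str.isIn "ninjakitchen.nl" url then some "NL" else some "BE"), some "Ninja")
  else if PySem.Str.isIn "sharkclean.nl" url || PySem.Str.isIn "sharkclean.be" url then
    ((if PySem.Str.isIn "sharkclean.nl" url then some "NL" else some "BE"), some "Shark")
  else (none, none)

def group_urls_by_category (urls : List String) : List (String × List String) :=
  (urls.foldl (fun (grouped : PySem.Dict String (List String)) url =>
    match categorize_url url with
    | (some country, some brand) =>
      let key := country ++ brand
      let grouped := if grouped.contains key then grouped else grouped.insert key []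
      grouped.modify key [] (· ++ [url])
    | _ => grouped) PySem.Dict.empty).items

-- ===== PORT B =====
def pvCategories : List (String × String × String) :=
  [("ninjakitchen.fr", "FR", "Ninja"),
   ("sharkclean.fr", "FR", "Shark"),
   ("ninjakitchen.es", "ES", "Ninja"),
   ("sharkclean.es", "ES", "Shark"),
   ("ninjakitchen.nl", "NL", "Ninja"),
   ("ninjakitchen.be", "BE", "Ninja"),
   ("sharkclean.nl", "NL", "Shark"),
   ("sharkclean.be", "BE", "Shark")]

-- next((c + b for s, c, b in _CATEGORIES if s in url), None)
def pvKeyOf (url : String) : Option String :=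
  (pvCategories.find? (fun e => PySem.Str.isIn e.1 url)).map (fun e => e.2.1 ++ e.2.2)

def group_urls_by_category_alt (urls : List String) : List (String × List String) :=
  let keyed := urls.filterMap (fun u => (pvKeyOf u).map (fun k => (k, u)))
  let keys := PySem.List.dedup (keyed.map Prod.fst)   -- list(dict.fromkeys(...))
  keys.map (fun k => (k, (keyed.filter (fun p => p.1 == k)).map Prod.snd))

-- ===== PRECONDITION & SPEC =====
def Spec_group_urls_by_category (urls : List String) (out : List (String × List String)) : Prop := out = group_urls_by_category_alt urls
instance (urls : List String) (out : List (String × List String)) : Decidable (Spec_group_urls_by_category urls out) := by unfold Spec_group_urls_by_category; infer_instance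

-- ===== CLAIM =====
def Claim_equal_group_urls_by_category : Prop := ∀ (urls : List String), Dom_group_urls_by_category urls → Spec_group_urls_by_category urls (group_urls_by_category urls)

-- ===== LEMMAS AND PROOFS =====

-- A's ensure-key-then-append update is the plain modify (new keys append at the end either way)
lemma dict_step_eq (d : PySem.Dict String (List String)) (k : String) (u : String) :
    (if d.contains k then d else d.insert k []).modify k [] (· ++ [u])
      = d.modify k [] (· ++ [u]) := by
  by_cases h : d.contains k = true
  · simp only [h, if_true]
  · simp only [Bool.not_eq_true] at h
    simp only [h, Bool.false_eq_true, if_false]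
    have h1 : (d.insert k []).modify k [] (· ++ [u])
        = (d.insert k []).insert k ((d.insert k []).getD k [] ++ [u]) := rfl
    have h2 : d.modify k [] (· ++ [u]) = d.insert k (d.getD k [] ++ [u]) := rfl
    rw [h1, h2, PySem.Dict.getD_insert_self, PySem.Dict.insert_insert_self,
        PySem.Dict.getD_of_not_contains d [] h]

-- A's per-url step is the modify-by-key step driven by pvKeyOf
lemma step_eq (d : PySem.Dict String (List String)) (url : String) :
    (match categorize_url url with
     | (some country, some brand) =>
       let key := country ++ brand
       let d' := if d.contains key then d else d.insert key []
       d'.modify key [] (· ++ [url])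
     | _ => d)
      = (match pvKeyOf url with
         | some k => d.modify k [] (· ++ [url])
         | none => d) := by
  by_cases h1 : PySem.Str.isIn "ninjakitchen.fr" url = true <;>
  by_cases h2 : PySem.Str.isIn "sharkclean.fr" url = true <;>
  by_cases h3 : PySem.Str.isIn "ninjakitchen.es" url = true <;>
  by_cases h4 : PySem.Str.isIn "sharkclean.es" url = true <;>
  by_cases h5 : PySem.Str.isIn "ninjakitchen.nl" url = true <;>
  by_cases h6 : PySem.Str.isIn "ninjakitchen.be" url = true <;>
  by_cases h7 : PySem.Str.isIn "sharkclean.nl" url = true <;>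
  by_cases h8 : PySem.Str.isIn "sharkclean.be" url = true <;>
  simp only [categorize_url, pvKeyOf, pvCategories, List.find?, h1, h2, h3, h4, h5, h6, h7, h8,
    Bool.or_self, Bool.or_true, Bool.or_false, Option.map_some,
    if_true, if_false, Bool.false_eq_true] <;>
  first
    | rfl
    | exact dict_step_eq d _ url

-- A's fold over urls is the modify-fold over the tagged pairs
lemma fold_eq (urls : List String) (d : PySem.Dict String (List String)) :
    urls.foldl (fun (grouped : PySem.Dict String (List String)) url =>
      match categorize_url url with
      | (some country, some brand) =>
        let key := country ++ brand
        let grouped := if grouped.contains key then grouped else grouped.insert key []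
        grouped.modify key [] (· ++ [url])
      | _ => grouped) d
      = (urls.filterMap (fun u => (pvKeyOf u).map (fun k => (k, u)))).foldl
          (fun (grouped : PySem.Dict String (List String)) p =>
            grouped.modify p.1 [] (· ++ [p.2])) d := by
  induction urls generalizing d with
  | nil => rfl
  | cons u rest ih =>
    simp only [List.foldl_cons, List.filterMap_cons]
    rw [step_eq d u]
    cases h : pvKeyOf u with
    | none => simp only [Option.map_none]; exact ih d
    | some k => simp only [Option.map_some, List.foldl_cons]; exact ih _

-- ===== VERDICT =====
theorem group_urls_by_category_spec : Claim_equal_group_urls_by_category := by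
  intro urls _
  unfold Spec_group_urls_by_category group_urls_by_category group_urls_by_category_alt
  rw [fold_eq]
  set l := urls.filterMap (fun u => (pvKeyOf u).map (fun k => (k, u))) with hl
  have hnd : ((l.foldl (fun (d : PySem.Dict String (List String)) p =>
      d.modify p.1 [] (· ++ [p.2])) PySem.Dict.empty).keys).Nodup :=
    PySem.Dict.nodup_keys_foldl_modify_key l Prod.fst [] (fun _ p => (· ++ [p.2]))
      PySem.Dict.empty (by simp)
  rw [PySem.Dict.items_eq_map_keys _ hnd []]
  rw [PySem.Dict.keys_foldl_modify_key]
  simp only [PySem.Dict.keys_empty, PySem.Set.update_nil_left, ← PySem.List.dedup_eq_ofList]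
  apply List.map_congr_left
  intro k _
  rw [PySem.Dict.getD_foldl_modify_append]
  simp [PySem.Dict.getD_empty]
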